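-- pv_equiv track=rewrite | github.com/piratejon/toyproblems | adventofcode/2017/04/solve.py | is_passphrase_valid_v1
-- ===== SOURCE A (Python) =====
-- def is_passphrase_valid_v1(p):
--     '''do any duplicate words appear'''
--     words = {}
--     for _ in p:
--         if _ not in words:
--             words[_] = 0
--         words[_] += 1
--         if words[_] > 1:
--             return False
--     return True
-- ===== SOURCE B (Python) =====
-- def is_passphrase_valid_v1(p):
--     words = sorted(p)
--     return all(a != b for a, b in zip(words, words[1:]))
-- ===== Notes on version B (the rewrite author's own statement) =====
-- stated objective: alternative
-- what changed: Replaces the dict-counting single pass with early return by sorting the words and checking that no two adjacent words in the sorted order are equal.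
import Mathlib
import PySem

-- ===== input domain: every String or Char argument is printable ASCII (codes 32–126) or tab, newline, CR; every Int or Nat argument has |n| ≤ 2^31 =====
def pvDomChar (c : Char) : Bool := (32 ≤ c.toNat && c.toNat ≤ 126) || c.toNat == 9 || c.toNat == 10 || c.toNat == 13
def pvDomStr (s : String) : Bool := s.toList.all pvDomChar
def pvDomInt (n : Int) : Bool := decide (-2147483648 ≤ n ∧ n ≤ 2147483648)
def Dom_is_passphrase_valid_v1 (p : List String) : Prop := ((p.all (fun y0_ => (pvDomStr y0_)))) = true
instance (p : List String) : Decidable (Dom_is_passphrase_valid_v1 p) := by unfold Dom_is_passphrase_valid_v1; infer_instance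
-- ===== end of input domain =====

-- B sorts the words and checks that no two adjacent words in the sorted order are equal
-- (alternative algorithm), instead of A's dict-counting pass with an early return.

-- ===== PORT A =====
-- the for-loop over p with the mutable dict 'words' and the early 'return False'
def pvGoA (words : PySem.Dict String Int) : List String → Bool
  | [] => true
  | w :: rest =>
    let words1 := if words.contains w = false then words.insert w (0 : Int) else words
    let words2 := words1.insert w (words1.getD w 0 + 1)
    if words2.getD w 0 > 1 then false else pvGoA words2 rest

def is_passphrase_valid_v1 (p : List String) : Bool := pvGoA PySem.Dict.empty p

-- ===== PORT B =====
def is_passphrase_valid_v1_alt (p : List String) : Bool :=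
  let words := PySem.List.sorted p (fun x => x) false
  (words.zip words.tail).all (fun ab => ab.1 != ab.2)

-- ===== PRECONDITION & SPEC =====
def Spec_is_passphrase_valid_v1 (p : List String) (out : Bool) : Prop := out = is_passphrase_valid_v1_alt p
instance (p : List String) (out : Bool) : Decidable (Spec_is_passphrase_valid_v1 p out) := by unfold Spec_is_passphrase_valid_v1; infer_instance

-- ===== CLAIM (what is proved, stated in full; the proofs are below) =====
def Claim_equal_is_passphrase_valid_v1 : Prop := ∀ (p : List String), Dom_is_passphrase_valid_v1 p → Spec_is_passphrase_valid_v1 p (is_passphrase_valid_v1 p)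

-- ===== LEMMAS AND PROOFS =====

-- the zip-adjacent test is exactly IsChain (· ≠ ·)
theorem zip_adj_iff (ws : List String) :
    (((ws.zip ws.tail).all (fun ab => ab.1 != ab.2)) = true) ↔ List.IsChain (· ≠ ·) ws := by
  induction ws with
  | nil => simp
  | cons a t ih =>
    cases t with
    | nil => simp
    | cons b t' =>
      simp only [List.tail_cons, List.zip_cons_cons, List.all_cons, List.isChain_cons_cons,
        Bool.and_eq_true] at *
      rw [ih]
      simp [bne]

-- on a (≤)-sorted list, adjacent-distinct is the same as duplicate-free
theorem chain_ne_iff_nodup (ws : List String) (hs : ws.Pairwise (· ≤ ·)) :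
    List.IsChain (· ≠ ·) ws ↔ ws.Nodup := by
  constructor
  · intro hc
    have hlt : List.IsChain (· < ·) ws := by
      revert hs hc
      induction ws with
      | nil => exact fun _ _ => List.isChain_nil
      | cons a t ih =>
        intro hs hc
        cases t with
        | nil => simp
        | cons b t' =>
          rw [List.isChain_cons_cons] at *
          rcases List.pairwise_cons.1 hs with ⟨hab, hs'⟩
          exact ⟨lt_of_le_of_ne (hab b (by simp)) hc.1, ih hs' hc.2⟩
    exact (List.isChain_iff_pairwise.1 hlt).imp ne_of_lt
  · intro hn
    exact List.Pairwise.isChain hn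

-- B returns true exactly on duplicate-free lists
theorem alt_eq_decide_nodup (p : List String) :
    is_passphrase_valid_v1_alt p = decide p.Nodup := by
  unfold is_passphrase_valid_v1_alt
  rw [Bool.eq_iff_iff]
  simp only [decide_eq_true_eq]
  rw [zip_adj_iff, chain_ne_iff_nodup _ (PySem.List.sorted_pairwise p (fun x => x))]
  exact (PySem.List.sorted_perm p (fun x => x) false).nodup_iff

-- invariant: every value stored in the dict is 1, and the loop returns true
-- iff the remaining words are duplicate-free and none of them is already a key
theorem goA_eq_decide (p : List String) (d : PySem.Dict String Int)
    (hinv : ∀ k v, d.get? k = some v → v = 1) :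
    pvGoA d p = decide (p.Nodup ∧ ∀ w ∈ p, d.contains w = false) := by
  induction p generalizing d with
  | nil => simp [pvGoA]
  | cons w rest ih =>
    by_cases hc : d.contains w = true
    · obtain ⟨v, hv⟩ : ∃ v, d.get? w = some v := by
        rcases h : d.get? w with _ | v
        · rw [PySem.Dict.get?_eq_none_iff_contains] at h; simp [h] at hc
        · exact ⟨v, rfl⟩
      have hv1 : v = 1 := hinv w v hv
      simp only [pvGoA, hc]
      have : (d.insert w (d.getD w 0 + 1)).getD w 0 = 2 := by
        rw [PySem.Dict.getD_insert_self, PySem.Dict.getD_of_get?_eq_some _ _ hv, hv1]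
        norm_num
      simp [this, hc]
    · have hc' : d.contains w = false := by simpa using hc
      simp only [pvGoA, hc', if_true]
      set d1 := d.insert w (0 : Int) with hd1
      have h1 : d1.getD w 0 = 0 := by rw [hd1, PySem.Dict.getD_insert_self]
      set d2 := d1.insert w (d1.getD w 0 + 1) with hd2
      have h2 : d2.getD w 0 = 1 := by rw [hd2, PySem.Dict.getD_insert_self, h1]; norm_num
      have hget2 : ∀ k v, d2.get? k = some v → v = 1 := by
        intro k v hk
        by_cases hkw : w = k
        · subst hkw; rw [hd2, PySem.Dict.get?_insert_self] at hk
          simp [h1] at hk; omega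
        · rw [hd2, PySem.Dict.get?_insert_of_ne _ _ (Ne.symm hkw),
              hd1, PySem.Dict.get?_insert_of_ne _ _ (Ne.symm hkw)] at hk
          exact hinv k v hk
      have hcont2 : ∀ u, d2.contains u = (u == w || d.contains u) := by
        intro u
        rw [hd2, PySem.Dict.contains_insert, hd1, PySem.Dict.contains_insert]
        cases hu : (u == w) <;> simp
      have hlt : ¬ ((1:Int) > 1) := by norm_num
      rw [h2, if_neg hlt, ih d2 hget2, Bool.eq_iff_iff]
      simp only [decide_eq_true_eq]
      constructor
      · rintro ⟨hn, hall⟩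
        have hwni : w ∉ rest := by
          intro hw
          have := hall w hw
          rw [hcont2 w] at this; simp at this
        refine ⟨List.nodup_cons.mpr ⟨hwni, hn⟩, ?_⟩
        intro u hu
        rcases List.mem_cons.1 hu with rfl | hu'
        · exact hc'
        · have := hall u hu'
          rw [hcont2 u] at this
          exact (Bool.or_eq_false_iff.1 this).2
      · rintro ⟨hn, hall⟩
        rcases List.nodup_cons.1 hn with ⟨hwni, hn'⟩
        refine ⟨hn', ?_⟩
        intro u hu
        rw [hcont2 u]
        have huw : ¬ (u = w) := fun h => hwni (h ▸ hu)
        simp [huw, hall u (List.mem_cons_of_mem _ hu)]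

-- ===== VERDICT (by name: the statement is the Claim_ definition above) =====
theorem is_passphrase_valid_v1_spec : Claim_equal_is_passphrase_valid_v1 := by
  intro p _
  unfold Spec_is_passphrase_valid_v1
  rw [alt_eq_decide_nodup, is_passphrase_valid_v1,
      goA_eq_decide p PySem.Dict.empty (by intro k v h; simp [PySem.Dict.get?_empty] at h)]
  simp [PySem.Dict.contains_empty]
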